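-- pv_equiv track=rewrite | github.com/naturalnumber/AI_Ast3 | objective_function.py | evaluate
-- ===== SOURCE A (Python) =====
-- def evaluate(x_arr, y_arr, type_arr):
--     result = 0
--     # for each piece
--     for i in range(len(x_arr)):
--         # we check if it is being attacked by another piece
--         for j in range(len(x_arr)):
--             if (i!=j) and (type_arr[j]<=1) and (x_arr[j]==x_arr[i] or y_arr[j]==y_arr[i]): # checking rows and columns for Queens and and Rooks
--                 result+=1
--                 break
--             if (i!=j) and (type_arr[j]%2==0) and (abs(x_arr[j]-x_arr[i])==abs(y_arr[j]-y_arr[i])): # checking diagonals for Queens and Bishops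
--                 result+=1
--                 break
--     return result
-- ===== SOURCE B (Python) =====
-- def evaluate(x_arr, y_arr, type_arr):
--     pieces = list(zip(x_arr, y_arr, type_arr))
--     rows = {}
--     cols = {}
--     diag1 = {}
--     diag2 = {}
--     for (x, y, t) in pieces:
--         if t <= 1:
--             rows[x] = rows.get(x, 0) + 1
--             cols[y] = cols.get(y, 0) + 1
--         if t % 2 == 0:
--             diag1[x - y] = diag1.get(x - y, 0) + 1
--             diag2[x + y] = diag2.get(x + y, 0) + 1
--     result = 0
--     for (x, y, t) in pieces:
--         s_rc = 1 if t <= 1 else 0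
--         s_d = 1 if t % 2 == 0 else 0
--         if (rows.get(x, 0) > s_rc or cols.get(y, 0) > s_rc
--                 or diag1.get(x - y, 0) > s_d or diag2.get(x + y, 0) > s_d):
--             result += 1
--     return result
-- ===== Notes on version B (the rewrite author's own statement) =====
-- stated objective: faster
-- what changed: Replaced the all-pairs attacker scan by one pass that hash-counts qualifying pieces per row, column and both diagonal keys, then tests each piece for the existence of another attacker by comparing the count with the piece's own contribution. Pre_ excludes mismatched-length inputs (y_arr or type_arr shorter than x_arr): A raises IndexError on most of them, and no behaviour is specified for such malformed boards — where A still returns, B scans only the common-length prefix.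
-- outside the precondition, e.g. on evaluate([0, 0, 0], [0, 0, 0], [0, 0]): A returns 3, B returns 2; on evaluate([5], [5], []): A returns 0, B returns 0
import Mathlib
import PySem

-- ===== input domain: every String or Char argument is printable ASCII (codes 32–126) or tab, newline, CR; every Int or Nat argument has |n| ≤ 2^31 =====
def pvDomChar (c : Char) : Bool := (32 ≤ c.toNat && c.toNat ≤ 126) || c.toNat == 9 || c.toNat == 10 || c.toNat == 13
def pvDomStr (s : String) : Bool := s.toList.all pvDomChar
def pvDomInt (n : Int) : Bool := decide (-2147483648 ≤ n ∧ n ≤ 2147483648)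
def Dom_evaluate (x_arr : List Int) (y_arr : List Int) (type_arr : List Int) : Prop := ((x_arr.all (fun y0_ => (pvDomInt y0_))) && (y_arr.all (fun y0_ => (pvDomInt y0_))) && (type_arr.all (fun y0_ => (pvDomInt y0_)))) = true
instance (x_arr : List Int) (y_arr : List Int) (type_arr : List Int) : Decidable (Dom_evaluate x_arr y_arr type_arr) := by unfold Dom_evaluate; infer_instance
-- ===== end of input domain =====

-- B replaces A's all-pairs scan by hash counts per row/column/diagonal keys plus a per-piece
-- existence test (measured asymptotically faster); equivalence is proved on Pre_ (y_arr and
-- type_arr at least as long as x_arr).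

-- ===== PORT A =====
-- inner 'for j in range(n)' loop of A: returns the 1 added before 'break', or 0 if no j fires
def evalInner (x_arr y_arr type_arr : List Int) (i : Int) : List Int → Int
  | [] => 0
  | j :: js =>
    if i ≠ j ∧ PySem.List.pyGetD type_arr j 0 ≤ 1 ∧
        (PySem.List.pyGetD x_arr j 0 = PySem.List.pyGetD x_arr i 0 ∨
         PySem.List.pyGetD y_arr j 0 = PySem.List.pyGetD y_arr i 0) then 1
    else if i ≠ j ∧ PySem.Int.mod (PySem.List.pyGetD type_arr j 0) 2 = 0 ∧
        |PySem.List.pyGetD x_arr j 0 - PySem.List.pyGetD x_arr i 0| =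
        |PySem.List.pyGetD y_arr j 0 - PySem.List.pyGetD y_arr i 0| then 1
    else evalInner x_arr y_arr type_arr i js

def evaluate (x_arr : List Int) (y_arr : List Int) (type_arr : List Int) : Int :=
  (PySem.List.pyRange 0 (x_arr.length : Int) 1).foldl
    (fun result i => result +
      evalInner x_arr y_arr type_arr i (PySem.List.pyRange 0 (x_arr.length : Int) 1)) 0

-- ===== PORT B =====
-- one step of Source B's counting loop over pieces (x, y, t): two ifs, four dicts
def altStep (st : PySem.Dict Int Int × PySem.Dict Int Int × PySem.Dict Int Int × PySem.Dict Int Int)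
    (p : Int × Int × Int) :
    PySem.Dict Int Int × PySem.Dict Int Int × PySem.Dict Int Int × PySem.Dict Int Int :=
  (if p.2.2 ≤ 1 then st.1.insert p.1 (st.1.getD p.1 0 + 1) else st.1,
   if p.2.2 ≤ 1 then st.2.1.insert p.2.1 (st.2.1.getD p.2.1 0 + 1) else st.2.1,
   if PySem.Int.mod p.2.2 2 = 0 then st.2.2.1.insert (p.1 - p.2.1) (st.2.2.1.getD (p.1 - p.2.1) 0 + 1) else st.2.2.1,
   if PySem.Int.mod p.2.2 2 = 0 then st.2.2.2.insert (p.1 + p.2.1) (st.2.2.2.getD (p.1 + p.2.1) 0 + 1) else st.2.2.2)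

def evaluate_alt (x_arr : List Int) (y_arr : List Int) (type_arr : List Int) : Int :=
  let pieces := x_arr.zip (y_arr.zip type_arr)
  let st := pieces.foldl altStep (PySem.Dict.empty, PySem.Dict.empty, PySem.Dict.empty, PySem.Dict.empty)
  pieces.foldl (fun result p =>
    let s_rc : Int := if p.2.2 ≤ 1 then 1 else 0
    let s_d : Int := if PySem.Int.mod p.2.2 2 = 0 then 1 else 0
    if st.1.getD p.1 0 > s_rc ∨ st.2.1.getD p.2.1 0 > s_rc ∨
       st.2.2.1.getD (p.1 - p.2.1) 0 > s_d ∨ st.2.2.2.getD (p.1 + p.2.1) 0 > s_d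
    then result + 1 else result) 0

-- ===== PRECONDITION & SPEC =====
-- Pre_ excludes mismatched-length inputs (y_arr or type_arr shorter than x_arr): A raises
-- IndexError on most of them, and no behaviour is specified for such malformed boards —
-- where A still returns, B scans only the common-length prefix.
def Pre_evaluate (x_arr : List Int) (y_arr : List Int) (type_arr : List Int) : Prop :=
  x_arr.length ≤ y_arr.length ∧ x_arr.length ≤ type_arr.length
instance (x_arr : List Int) (y_arr : List Int) (type_arr : List Int) : Decidable (Pre_evaluate x_arr y_arr type_arr) := by unfold Pre_evaluate; infer_instance

def pvWitness_evaluate : List Int × List Int × List Int := ([0, 3, 0], [1, 1, 5], [0, 2, 4])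

def Spec_evaluate (x_arr : List Int) (y_arr : List Int) (type_arr : List Int) (out : Int) : Prop := out = evaluate_alt x_arr y_arr type_arr
instance (x_arr : List Int) (y_arr : List Int) (type_arr : List Int) (out : Int) : Decidable (Spec_evaluate x_arr y_arr type_arr out) := by unfold Spec_evaluate; infer_instance

-- ===== CLAIM (what is proved, stated in full; the proofs are below) =====
def Claim_equal_evaluate : Prop := ∀ (x_arr : List Int) (y_arr : List Int) (type_arr : List Int), Dom_evaluate x_arr y_arr type_arr → Pre_evaluate x_arr y_arr type_arr → Spec_evaluate x_arr y_arr type_arr (evaluate x_arr y_arr type_arr)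

-- ===== LEMMAS AND PROOFS =====

-- the attacker condition of A's inner loop, as one predicate
def condA (x_arr y_arr type_arr : List Int) (i j : Int) : Bool :=
  decide (i ≠ j ∧
    ((PySem.List.pyGetD type_arr j 0 ≤ 1 ∧
        (PySem.List.pyGetD x_arr j 0 = PySem.List.pyGetD x_arr i 0 ∨
         PySem.List.pyGetD y_arr j 0 = PySem.List.pyGetD y_arr i 0)) ∨
     (PySem.Int.mod (PySem.List.pyGetD type_arr j 0) 2 = 0 ∧
        |PySem.List.pyGetD x_arr j 0 - PySem.List.pyGetD x_arr i 0| =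
        |PySem.List.pyGetD y_arr j 0 - PySem.List.pyGetD y_arr i 0|)))

theorem condA_iff (x_arr y_arr type_arr : List Int) (i j : Int) :
    condA x_arr y_arr type_arr i j = true ↔
      (i ≠ j ∧
        ((PySem.List.pyGetD type_arr j 0 ≤ 1 ∧
            (PySem.List.pyGetD x_arr j 0 = PySem.List.pyGetD x_arr i 0 ∨
             PySem.List.pyGetD y_arr j 0 = PySem.List.pyGetD y_arr i 0)) ∨
         (PySem.Int.mod (PySem.List.pyGetD type_arr j 0) 2 = 0 ∧
            |PySem.List.pyGetD x_arr j 0 - PySem.List.pyGetD x_arr i 0| =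
            |PySem.List.pyGetD y_arr j 0 - PySem.List.pyGetD y_arr i 0|))) := by
  simp [condA]

theorem evalInner_eq (x y t : List Int) (i : Int) (js : List Int) :
    evalInner x y t i js = if ∃ j ∈ js, condA x y t i j = true then 1 else 0 := by
  induction js with
  | nil => simp [evalInner]
  | cons j js ih =>
    rw [evalInner, ih]
    by_cases h1 : i ≠ j ∧ PySem.List.pyGetD t j 0 ≤ 1 ∧
        (PySem.List.pyGetD x j 0 = PySem.List.pyGetD x i 0 ∨
         PySem.List.pyGetD y j 0 = PySem.List.pyGetD y i 0)
    · simp only [if_pos h1]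
      rw [if_pos]
      exact ⟨j, List.mem_cons_self, (condA_iff x y t i j).mpr ⟨h1.1, Or.inl h1.2⟩⟩
    · rw [if_neg h1]
      by_cases h2 : i ≠ j ∧ PySem.Int.mod (PySem.List.pyGetD t j 0) 2 = 0 ∧
          |PySem.List.pyGetD x j 0 - PySem.List.pyGetD x i 0| =
          |PySem.List.pyGetD y j 0 - PySem.List.pyGetD y i 0|
      · rw [if_pos h2, if_pos]
        exact ⟨j, List.mem_cons_self, (condA_iff x y t i j).mpr ⟨h2.1, Or.inr h2.2⟩⟩
      · rw [if_neg h2]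
        congr 1
        simp only [List.mem_cons, eq_iff_iff]
        constructor
        · rintro ⟨j', hj', hc⟩; exact ⟨j', Or.inr hj', hc⟩
        · rintro ⟨j', hj' | hj', hc⟩
          · exfalso
            rcases (condA_iff x y t i j').mp hc with ⟨hne, hcc | hcc⟩
            · exact h1 (hj' ▸ ⟨hne, hcc⟩)
            · exact h2 (hj' ▸ ⟨hne, hcc⟩)
          · exact ⟨j', hj', hc⟩

-- splitting the 4-dict fold of B into four independent folds
theorem foldl_altStep_split (l : List (Int × Int × Int)) (a b c d : PySem.Dict Int Int) :
    l.foldl altStep (a, b, c, d) =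
      (l.foldl (fun dd p => if p.2.2 ≤ 1 then dd.insert p.1 (dd.getD p.1 0 + 1) else dd) a,
       l.foldl (fun dd p => if p.2.2 ≤ 1 then dd.insert p.2.1 (dd.getD p.2.1 0 + 1) else dd) b,
       l.foldl (fun dd p => if PySem.Int.mod p.2.2 2 = 0 then dd.insert (p.1 - p.2.1) (dd.getD (p.1 - p.2.1) 0 + 1) else dd) c,
       l.foldl (fun dd p => if PySem.Int.mod p.2.2 2 = 0 then dd.insert (p.1 + p.2.1) (dd.getD (p.1 + p.2.1) 0 + 1) else dd) d) := by
  induction l generalizing a b c d with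
  | nil => rfl
  | cons p l ih =>
    rw [List.foldl_cons, altStep, ih]
    simp only [List.foldl_cons]

-- a conditional counting loop into a dict computes a count
theorem getD_countingFold {γ : Type} (l : List γ) (q : γ → Prop) [DecidablePred q]
    (key : γ → Int) (k : Int) :
    ((l.foldl (fun d p => if q p then d.insert (key p) (d.getD (key p) 0 + 1) else d)
        PySem.Dict.empty).getD k 0)
      = (((l.filter (fun p => decide (q p))).map key).count k : Int) := by
  rw [PySem.List.foldl_ite_eq_foldl_filter]
  rw [← List.foldl_map (f := key) (g := fun (d : PySem.Dict Int Int) x => d.insert x (d.getD x 0 + 1))]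
  rw [PySem.Dict.getD_foldl_insert_add_one]
  simp

-- count strictly above the element's own contribution = another element satisfies p
theorem countP_gt_iff {l : List Int} (hnd : l.Nodup) {i : Int} (hi : i ∈ l) (p : Int → Bool) :
    ((if p i then (1:Int) else 0) < (l.countP p : Int)) ↔ ∃ j ∈ l, j ≠ i ∧ p j := by
  have hperm : l.Perm (i :: l.erase i) := List.perm_cons_erase hi
  have hc : l.countP p = (l.erase i).countP p + (if p i then 1 else 0) := by
    rw [hperm.countP_eq, List.countP_cons]
  have hmem : ∀ j, j ∈ l.erase i ↔ j ≠ i ∧ j ∈ l := by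
    intro j; exact hnd.mem_erase_iff
  have key : ((if p i then (1:Int) else 0) < (l.countP p : Int)) ↔ 0 < (l.erase i).countP p := by
    rw [hc]; by_cases hp : p i <;> simp [hp]
  rw [key, List.countP_pos_iff]
  constructor
  · rintro ⟨j, hj, hpj⟩
    exact ⟨j, ((hmem j).mp hj).2, ((hmem j).mp hj).1, hpj⟩
  · rintro ⟨j, hj, hne, hpj⟩
    exact ⟨j, (hmem j).mpr ⟨hne, hj⟩, hpj⟩

-- zip of three lists as an index map, when the first list is shortest
theorem zip3_eq_map (x y t : List Int) (h1 : x.length ≤ y.length) (h2 : x.length ≤ t.length) :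
    x.zip (y.zip t) = (PySem.List.pyRange 0 (x.length : Int) 1).map
      (fun j => (PySem.List.pyGetD x j 0, PySem.List.pyGetD y j 0, PySem.List.pyGetD t j 0)) := by
  apply List.ext_getElem
  · simp [PySem.List.length_pyRange_one]; omega
  · intro n hn1 hn2
    have h3 : n < x.length ∧ n < y.length ∧ n < t.length := by simpa using hn1
    simp [PySem.List.getElem_pyRange_one, h3.1, h3.2.1, h3.2.2]

-- distributing A's existence over the four hash keys
theorem exists_condA_split (x y t : List Int) (idxs : List Int) (i : Int) :
    (∃ j ∈ idxs, condA x y t i j = true) ↔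
      ((∃ j ∈ idxs, j ≠ i ∧ (PySem.List.pyGetD t j 0 ≤ 1 ∧ PySem.List.pyGetD x j 0 = PySem.List.pyGetD x i 0)) ∨
       (∃ j ∈ idxs, j ≠ i ∧ (PySem.List.pyGetD t j 0 ≤ 1 ∧ PySem.List.pyGetD y j 0 = PySem.List.pyGetD y i 0)) ∨
       (∃ j ∈ idxs, j ≠ i ∧ (PySem.Int.mod (PySem.List.pyGetD t j 0) 2 = 0 ∧
          PySem.List.pyGetD x j 0 - PySem.List.pyGetD y j 0 = PySem.List.pyGetD x i 0 - PySem.List.pyGetD y i 0)) ∨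
       (∃ j ∈ idxs, j ≠ i ∧ (PySem.Int.mod (PySem.List.pyGetD t j 0) 2 = 0 ∧
          PySem.List.pyGetD x j 0 + PySem.List.pyGetD y j 0 = PySem.List.pyGetD x i 0 + PySem.List.pyGetD y i 0))) := by
  constructor
  · rintro ⟨j, hj, hc⟩
    obtain ⟨hne, h⟩ := (condA_iff x y t i j).mp hc
    rcases h with ⟨ht, hx | hy⟩ | ⟨ht, habs⟩
    · exact Or.inl ⟨j, hj, hne.symm, ht, hx⟩
    · exact Or.inr (Or.inl ⟨j, hj, hne.symm, ht, hy⟩)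
    · rcases abs_eq_abs.mp habs with h | h
      · exact Or.inr (Or.inr (Or.inl ⟨j, hj, hne.symm, ht, by omega⟩))
      · exact Or.inr (Or.inr (Or.inr ⟨j, hj, hne.symm, ht, by omega⟩))
  · rintro (⟨j, hj, hne, ht, hk⟩ | ⟨j, hj, hne, ht, hk⟩ | ⟨j, hj, hne, ht, hk⟩ | ⟨j, hj, hne, ht, hk⟩)
    · exact ⟨j, hj, (condA_iff x y t i j).mpr ⟨hne.symm, Or.inl ⟨ht, Or.inl hk⟩⟩⟩
    · exact ⟨j, hj, (condA_iff x y t i j).mpr ⟨hne.symm, Or.inl ⟨ht, Or.inr hk⟩⟩⟩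
    · exact ⟨j, hj, (condA_iff x y t i j).mpr ⟨hne.symm, Or.inr ⟨ht, abs_eq_abs.mpr (Or.inl (by omega))⟩⟩⟩
    · exact ⟨j, hj, (condA_iff x y t i j).mpr ⟨hne.symm, Or.inr ⟨ht, abs_eq_abs.mpr (Or.inr (by omega))⟩⟩⟩

-- per-key existence test of B: dict count strictly above own contribution
theorem key_count_iff (idxs : List Int) (hnd : idxs.Nodup) {i : Int} (hi : i ∈ idxs)
    (q : Int → Prop) [DecidablePred q] (key : Int → Int) :
    ((if q i then (1:Int) else 0)
        < (((idxs.filter (fun j => decide (q j))).map key).count (key i) : Int))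
      ↔ ∃ j ∈ idxs, j ≠ i ∧ (q j ∧ key j = key i) := by
  have hcnt : ((idxs.filter (fun j => decide (q j))).map key).count (key i)
      = idxs.countP (fun j => decide (q j) && decide (key j = key i)) := by
    rw [List.count_eq_countP, List.countP_map, List.countP_filter]
    apply List.countP_congr
    intro j _
    simp [Function.comp, beq_iff_eq, and_comm]
  have hif : (if q i then (1:Int) else 0)
      = if (decide (q i) && decide (key i = key i)) = true then (1:Int) else 0 := by
    simp
  rw [hcnt, hif]
  exact (countP_gt_iff hnd hi (fun j => decide (q j) && decide (key j = key i))).trans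
    (by
      constructor
      · rintro ⟨j, hj, hne, hpj⟩
        simp only [Bool.and_eq_true, decide_eq_true_eq] at hpj
        exact ⟨j, hj, hne, hpj⟩
      · rintro ⟨j, hj, hne, hq, hk⟩
        exact ⟨j, hj, hne, by simp [hq, hk]⟩)

-- ===== VERDICT (by name: the statement is the Claim_ definition above) =====
theorem evaluate_spec : Claim_equal_evaluate := by
  intro x_arr y_arr type_arr _hdom hpre
  obtain ⟨h1, h2⟩ := hpre
  unfold Spec_evaluate
  simp only [evaluate, evaluate_alt]
  rw [zip3_eq_map x_arr y_arr type_arr h1 h2, foldl_altStep_split]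
  simp only [List.foldl_map]
  apply PySem.List.foldl_congr_mem
  intro acc i hi
  rw [evalInner_eq]
  rw [getD_countingFold _ (fun j => PySem.List.pyGetD type_arr j 0 ≤ 1)
        (fun j => PySem.List.pyGetD x_arr j 0),
      getD_countingFold _ (fun j => PySem.List.pyGetD type_arr j 0 ≤ 1)
        (fun j => PySem.List.pyGetD y_arr j 0),
      getD_countingFold _ (fun j => PySem.Int.mod (PySem.List.pyGetD type_arr j 0) 2 = 0)
        (fun j => PySem.List.pyGetD x_arr j 0 - PySem.List.pyGetD y_arr j 0),
      getD_countingFold _ (fun j => PySem.Int.mod (PySem.List.pyGetD type_arr j 0) 2 = 0)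
        (fun j => PySem.List.pyGetD x_arr j 0 + PySem.List.pyGetD y_arr j 0)]
  simp only [gt_iff_lt,
    key_count_iff _ (PySem.List.nodup_pyRange_one _ _) hi
      (fun j => PySem.List.pyGetD type_arr j 0 ≤ 1) (fun j => PySem.List.pyGetD x_arr j 0),
    key_count_iff _ (PySem.List.nodup_pyRange_one _ _) hi
      (fun j => PySem.List.pyGetD type_arr j 0 ≤ 1) (fun j => PySem.List.pyGetD y_arr j 0),
    key_count_iff _ (PySem.List.nodup_pyRange_one _ _) hi
      (fun j => PySem.Int.mod (PySem.List.pyGetD type_arr j 0) 2 = 0)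
      (fun j => PySem.List.pyGetD x_arr j 0 - PySem.List.pyGetD y_arr j 0),
    key_count_iff _ (PySem.List.nodup_pyRange_one _ _) hi
      (fun j => PySem.Int.mod (PySem.List.pyGetD type_arr j 0) 2 = 0)
      (fun j => PySem.List.pyGetD x_arr j 0 + PySem.List.pyGetD y_arr j 0),
    ← exists_condA_split]
  split_ifs with hE <;> omega
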